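-- pv_equiv track=rewrite | github.com/jess-garnett/MISalign | MISalign/canvas/canvas_rectangular.py | find_relative_extents
-- ===== SOURCE A (Python) =====
-- def find_relative_extents(
--         image_names:list,
--         origin_relative_offsets:dict,
--         image_sizes:dict):
--     """ Gets minimum and maximum x and y extents relative to the origin.
--     - Takes:
--         - A list of image names
--         - A dictionary of origin relative offsets {image_name:(x-offset,y-offset)}
--         - A dictionary of image sizes: {image_name:(width,height)}
--     - Returns a dictionary of origin relative extents with keys `minx`,`maxx`,`miny`, and `maxy`"""
--     x=[]
--     y=[]
--     for img in image_names:
--         img_corner=origin_relative_offsets[img] #top left corner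
--         img_size=image_sizes[img]
--         x.append(-img_corner[0])#left side
--         x.append(-img_corner[0]+img_size[0])#right side
--         y.append(img_corner[1])#top side
--         y.append(img_corner[1]-img_size[1])#bottom side
--         # Top to bottom is in the negative direction which is why the -img_size[1] is needed.
--     origin_relative_extents=dict()
--     origin_relative_extents["minx"]=min(x)
--     origin_relative_extents["maxx"]=max(x)
--     origin_relative_extents["miny"]=min(y)
--     origin_relative_extents["maxy"]=max(y)
--     return origin_relative_extents
-- ===== SOURCE B (Python) =====
-- def find_relative_extents(
--         image_names:list,
--         origin_relative_offsets:dict,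
--         image_sizes:dict):
--     """Single pass keeping four running accumulators instead of building x/y lists."""
--     first = image_names[0]
--     ox, oy = origin_relative_offsets[first]
--     w, h = image_sizes[first]
--     minx = min(-ox, -ox + w)
--     maxx = max(-ox, -ox + w)
--     miny = min(oy, oy - h)
--     maxy = max(oy, oy - h)
--     for img in image_names[1:]:
--         cx, cy = origin_relative_offsets[img]
--         sw, sh = image_sizes[img]
--         minx = min(minx, -cx, -cx + sw)
--         maxx = max(maxx, -cx, -cx + sw)
--         miny = min(miny, cy, cy - sh)
--         maxy = max(maxy, cy, cy - sh)
--     return {"minx": minx, "maxx": maxx, "miny": miny, "maxy": maxy}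
-- ===== Notes on version B (the rewrite author's own statement) =====
-- stated objective: simpler
-- what changed: Replaces A's intermediate x/y candidate lists plus four separate min()/max() scans with a single pass that folds each image's four edge values into four running accumulators.
import Mathlib
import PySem

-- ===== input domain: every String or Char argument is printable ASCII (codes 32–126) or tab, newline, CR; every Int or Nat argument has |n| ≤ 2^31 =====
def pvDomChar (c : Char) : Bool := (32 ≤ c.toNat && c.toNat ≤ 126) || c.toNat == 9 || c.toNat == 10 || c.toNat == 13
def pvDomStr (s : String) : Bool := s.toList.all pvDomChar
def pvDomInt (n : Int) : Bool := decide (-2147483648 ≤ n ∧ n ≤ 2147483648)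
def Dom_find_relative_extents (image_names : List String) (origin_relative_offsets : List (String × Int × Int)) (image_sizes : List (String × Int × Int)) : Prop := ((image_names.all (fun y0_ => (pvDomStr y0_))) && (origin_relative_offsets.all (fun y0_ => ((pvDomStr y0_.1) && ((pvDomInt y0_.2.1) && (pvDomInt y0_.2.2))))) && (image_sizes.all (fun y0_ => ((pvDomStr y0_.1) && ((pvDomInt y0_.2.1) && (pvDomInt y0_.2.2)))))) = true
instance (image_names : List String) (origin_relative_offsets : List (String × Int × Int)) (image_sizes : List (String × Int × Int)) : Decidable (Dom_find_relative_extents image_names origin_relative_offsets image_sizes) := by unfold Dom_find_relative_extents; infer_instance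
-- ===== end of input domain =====

-- B replaces A's intermediate x/y candidate lists + four min()/max() scans by one
-- pass folding four running min/max accumulators (simpler, O(1) extra space).


-- shared dict primitive: first-match lookup in the association list (Python d[k]);
-- the (0, 0) default is never reached inside Pre_ (Python raises KeyError there)
def freGet (d : List (String × Int × Int)) (k : String) : Int × Int :=
  ((d.find? (fun p => p.1 == k)).map (fun p => p.2)).getD (0, 0)

-- ===== PORT A =====
def find_relative_extents (image_names : List String) (origin_relative_offsets : List (String × Int × Int)) (image_sizes : List (String × Int × Int)) : List (String × Int) :=
  let xy := image_names.foldl (fun (acc : List Int × List Int) img =>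
      let img_corner := freGet origin_relative_offsets img
      let img_size := freGet image_sizes img
      (acc.1 ++ [-img_corner.1, -img_corner.1 + img_size.1],
       acc.2 ++ [img_corner.2, img_corner.2 - img_size.2])) ([], [])
  match PySem.List.min? xy.1 (fun v => v), PySem.List.max? xy.1 (fun v => v),
        PySem.List.min? xy.2 (fun v => v), PySem.List.max? xy.2 (fun v => v) with
  | some mnx, some mxx, some mny, some mxy =>
      [("minx", mnx), ("maxx", mxx), ("miny", mny), ("maxy", mxy)]
  | _, _, _, _ => []  -- min([]) raises ValueError in Python; excluded by Pre_

-- ===== PORT B =====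
def find_relative_extents_alt (image_names : List String) (origin_relative_offsets : List (String × Int × Int)) (image_sizes : List (String × Int × Int)) : List (String × Int) :=
  match image_names with
  | [] => []  -- image_names[0] raises IndexError in Python; excluded by Pre_
  | first :: rest =>
    let o := freGet origin_relative_offsets first
    let s := freGet image_sizes first
    let st := rest.foldl (fun (st : (Int × Int) × (Int × Int)) img =>
        let c := freGet origin_relative_offsets img
        let z := freGet image_sizes img
        ((min (min st.1.1 (-c.1)) (-c.1 + z.1), max (max st.1.2 (-c.1)) (-c.1 + z.1)),
         (min (min st.2.1 c.2) (c.2 - z.2), max (max st.2.2 c.2) (c.2 - z.2))))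
      ((min (-o.1) (-o.1 + s.1), max (-o.1) (-o.1 + s.1)),
       (min o.2 (o.2 - s.2), max o.2 (o.2 - s.2)))
    [("minx", st.1.1), ("maxx", st.1.2), ("miny", st.2.1), ("maxy", st.2.2)]

-- ===== PRECONDITION & SPEC =====
-- Pre_ excludes exactly the inputs where Python A raises: an empty image_names
-- (min([]) → ValueError) and a name absent from either dict (KeyError).
def Pre_find_relative_extents (image_names : List String) (origin_relative_offsets : List (String × Int × Int)) (image_sizes : List (String × Int × Int)) : Prop :=
  image_names ≠ [] ∧ ∀ img ∈ image_names,
    (origin_relative_offsets.any (fun p => p.1 == img)) = true ∧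
    (image_sizes.any (fun p => p.1 == img)) = true
instance (image_names : List String) (origin_relative_offsets : List (String × Int × Int)) (image_sizes : List (String × Int × Int)) : Decidable (Pre_find_relative_extents image_names origin_relative_offsets image_sizes) := by unfold Pre_find_relative_extents; infer_instance
def pvWitness_find_relative_extents : List String × (List (String × Int × Int)) × (List (String × Int × Int)) :=
  (["a", "b"], [("a", 1, 2), ("b", -3, 0)], [("a", 4, 5), ("b", 2, -1)])
def Spec_find_relative_extents (image_names : List String) (origin_relative_offsets : List (String × Int × Int)) (image_sizes : List (String × Int × Int)) (out : List (String × Int)) : Prop := out = find_relative_extents_alt image_names origin_relative_offsets image_sizes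
instance (image_names : List String) (origin_relative_offsets : List (String × Int × Int)) (image_sizes : List (String × Int × Int)) (out : List (String × Int)) : Decidable (Spec_find_relative_extents image_names origin_relative_offsets image_sizes out) := by unfold Spec_find_relative_extents; infer_instance

-- ===== CLAIM (what is proved, stated in full; the proofs are below) =====
def Claim_equal_find_relative_extents : Prop := ∀ (image_names : List String) (origin_relative_offsets : List (String × Int × Int)) (image_sizes : List (String × Int × Int)), Dom_find_relative_extents image_names origin_relative_offsets image_sizes → Pre_find_relative_extents image_names origin_relative_offsets image_sizes → Spec_find_relative_extents image_names origin_relative_offsets image_sizes (find_relative_extents image_names origin_relative_offsets image_sizes)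

-- ===== LEMMAS AND PROOFS =====

-- A's list-building fold is an append of per-image edge pairs
theorem fre_foldA (off sz : List (String × Int × Int)) (ns : List String)
    (xs ys : List Int) :
    ns.foldl (fun (acc : List Int × List Int) img =>
      let img_corner := freGet off img
      let img_size := freGet sz img
      (acc.1 ++ [-img_corner.1, -img_corner.1 + img_size.1],
       acc.2 ++ [img_corner.2, img_corner.2 - img_size.2])) (xs, ys)
    = (xs ++ ns.flatMap (fun img =>
          [-(freGet off img).1, -(freGet off img).1 + (freGet sz img).1]),
       ys ++ ns.flatMap (fun img =>
          [(freGet off img).2, (freGet off img).2 - (freGet sz img).2])) := by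
  induction ns generalizing xs ys with
  | nil => simp
  | cons n t ih => simp [List.foldl, ih]

-- folding min over the flattened two-per-image list = B-style fold
theorem fre_foldl_min (l r : String → Int) (ns : List String) (a : Int) :
    (ns.flatMap (fun i => [l i, r i])).foldl min a
    = ns.foldl (fun m i => min (min m (l i)) (r i)) a := by
  induction ns generalizing a with
  | nil => rfl
  | cons n t ih => simp [List.foldl, ih]

theorem fre_foldl_max (l r : String → Int) (ns : List String) (a : Int) :
    (ns.flatMap (fun i => [l i, r i])).foldl max a
    = ns.foldl (fun m i => max (max m (l i)) (r i)) a := by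
  induction ns generalizing a with
  | nil => rfl
  | cons n t ih => simp [List.foldl, ih]

-- B's single fold over a 4-tuple computes the four scalar folds componentwise
theorem fre_foldB (off sz : List (String × Int × Int)) (ns : List String)
    (a b c d : Int) :
    ns.foldl (fun (st : (Int × Int) × (Int × Int)) img =>
        let cc := freGet off img
        let z := freGet sz img
        ((min (min st.1.1 (-cc.1)) (-cc.1 + z.1), max (max st.1.2 (-cc.1)) (-cc.1 + z.1)),
         (min (min st.2.1 cc.2) (cc.2 - z.2), max (max st.2.2 cc.2) (cc.2 - z.2))))
      ((a, b), (c, d))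
    = ((ns.foldl (fun m i => min (min m (-(freGet off i).1)) (-(freGet off i).1 + (freGet sz i).1)) a,
        ns.foldl (fun m i => max (max m (-(freGet off i).1)) (-(freGet off i).1 + (freGet sz i).1)) b),
       (ns.foldl (fun m i => min (min m (freGet off i).2) ((freGet off i).2 - (freGet sz i).2)) c,
        ns.foldl (fun m i => max (max m (freGet off i).2) ((freGet off i).2 - (freGet sz i).2)) d)) := by
  induction ns generalizing a b c d with
  | nil => rfl
  | cons n t ih => rw [List.foldl_cons]; exact ih _ _ _ _

-- ===== VERDICT (by name: the statement is the Claim_ definition above) =====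
theorem find_relative_extents_spec : Claim_equal_find_relative_extents := by
  intro ns off sz _ hpre
  obtain ⟨hne, _⟩ := hpre
  match ns with
  | [] => exact absurd rfl hne
  | n :: t =>
    show find_relative_extents (n :: t) off sz = find_relative_extents_alt (n :: t) off sz
    rw [find_relative_extents, find_relative_extents_alt]
    rw [fre_foldA off sz (n :: t) [] []]
    simp only [List.nil_append, List.flatMap_cons, List.cons_append, List.nil_append]
    rw [PySem.List.min?_id_cons, PySem.List.max?_id_cons,
        PySem.List.min?_id_cons, PySem.List.max?_id_cons]
    simp only [List.foldl_cons]
    rw [fre_foldl_min, fre_foldl_max, fre_foldl_min, fre_foldl_max, fre_foldB]
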